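-- pv_equiv track=rewrite | github.com/brunogoliveira-ufpr/JSTargetFuzzer-V2 | client/data_processing/files_analysis/count_lines_per_operation.py | count_lines_per_operation
-- ===== SOURCE A (Python) =====
-- def count_lines_per_operation(content, operation_counts):
--     """
--     Count the number of lines per operation in the given content.
--
--     Parameters:
--     content (str): The content of the file.
--     operation_counts (dict): A dictionary where keys are operation names and values are their counts.
--
--     Returns:
--     dict: A dictionary where keys are operation names and values are line counts.
--     """
--     lines_per_operation = {op: 0 for op in operation_counts.keys()}
--     lines = content.split('\n')
--
--     for line in lines:
--         for operation in lines_per_operation.keys():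
--             if operation in line:
--                 lines_per_operation[operation] += 1
--
--     # Ensure the line count is multiplied by the operation count
--     for op in lines_per_operation.keys():
--         lines_per_operation[op] *= operation_counts[op]
--
--     return lines_per_operation
-- ===== SOURCE B (Python) =====
-- def count_lines_per_operation(content, operation_counts):
--     # Multi-pattern scan: instead of testing each operation against each line,
--     # scan each line's positions once, slicing candidate substrings of the
--     # operations' lengths and looking them up in a hash set of operations.
--     op_lens = {len(op) for op in operation_counts}
--     hits = {op: 0 for op in operation_counts}
--     for line in content.split('\n'):
--         n = len(line)
--         matched = set()
--         for i in range(n + 1):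
--             for L in op_lens:
--                 if i + L <= n:
--                     sub = line[i:i + L]
--                     if sub in hits:
--                         matched.add(sub)
--         for op in matched:
--             hits[op] += 1
--     return {op: hits[op] * c for op, c in operation_counts.items()}
-- ===== Notes on version B (the rewrite author's own statement) =====
-- stated objective: faster
-- what changed: Replaces A's per-line loop over all operations testing 'op in line' with a multi-pattern scan: each line is scanned position by position, candidate substrings of the operations' distinct lengths are sliced out and looked up in a hash table of operations, so the per-operation containment test disappears.
import Mathlib
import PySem

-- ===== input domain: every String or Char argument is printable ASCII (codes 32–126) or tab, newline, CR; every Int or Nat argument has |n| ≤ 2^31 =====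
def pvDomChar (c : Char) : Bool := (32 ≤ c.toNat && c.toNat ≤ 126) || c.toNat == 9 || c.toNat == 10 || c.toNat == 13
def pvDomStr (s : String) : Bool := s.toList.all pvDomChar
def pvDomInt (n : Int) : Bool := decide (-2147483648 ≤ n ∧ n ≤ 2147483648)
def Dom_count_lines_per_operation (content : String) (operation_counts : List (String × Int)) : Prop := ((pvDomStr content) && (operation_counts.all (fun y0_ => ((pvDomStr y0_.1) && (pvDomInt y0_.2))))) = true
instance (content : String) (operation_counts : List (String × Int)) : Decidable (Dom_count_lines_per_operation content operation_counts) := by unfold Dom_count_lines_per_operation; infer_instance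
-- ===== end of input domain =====

-- B replaces A's per-line loop over all operations ('op in line' for each op) with a
-- multi-pattern scan: each line is scanned position by position, candidate substrings of the
-- operations' lengths are sliced out and looked up in the operations hash table, so no
-- per-operation containment test remains; a timing run measured B faster (objective: faster).

-- ===== PORT A =====
-- the Python dict argument, as dict(operation_counts) (last value wins, first position kept)
def count_lines_per_operation (content : String) (operation_counts : List (String × Int)) : List (String × Int) :=
  let oc := PySem.Dict.ofList operation_counts
  -- lines_per_operation = {op: 0 for op in operation_counts.keys()}
  let lpo0 := oc.keys.foldl (fun d op => d.insert op (0 : Int)) PySem.Dict.empty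
  let lines := (PySem.Str.split? content "\n").getD []
  -- for line in lines: for operation in lines_per_operation.keys(): if operation in line: += 1
  let lpo1 := lines.foldl
    (fun d line =>
      d.keys.foldl (fun d op => if PySem.Str.isIn op line then d.modify op 0 (· + 1) else d) d)
    lpo0
  -- for op in lines_per_operation.keys(): lines_per_operation[op] *= operation_counts[op]
  let lpo2 := lpo1.keys.foldl (fun d op => d.modify op 0 (fun v => v * oc.getD op 0)) lpo1
  lpo2.items

-- ===== PORT B =====
-- op_lens = {len(op) for op in operation_counts}; hits = {op: 0 for op in operation_counts};
-- per line, scan positions i, slice line[i:i+L] for each pattern length L, look the slice up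
-- in the hits table, collect the matched set, then bump each matched operation once;
-- finally {op: hits[op] * c for op, c in operation_counts.items()}
def count_lines_per_operation_alt (content : String) (operation_counts : List (String × Int)) : List (String × Int) :=
  let oc := PySem.Dict.ofList operation_counts
  let opLens : PySem.Set Int := PySem.Set.ofList (oc.keys.map (fun op => PySem.Str.len op))
  let hits0 := oc.keys.foldl (fun d op => d.insert op (0 : Int)) PySem.Dict.empty
  let lines := (PySem.Str.split? content "\n").getD []
  let hits := lines.foldl
    (fun h line =>
      ((PySem.List.pyRange 0 (PySem.Str.len line + 1) 1).foldl
        (fun m i => opLens.foldl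
          (fun m L =>
            if i + L ≤ PySem.Str.len line then
              if h.contains (PySem.Str.slice line (some i) (some (i + L))) then
                PySem.Set.add m (PySem.Str.slice line (some i) (some (i + L)))
              else m
            else m) m)
        PySem.Set.empty).foldl (fun h op => h.modify op 0 (· + 1)) h)
    hits0
  oc.items.map (fun p => (p.1, hits.getD p.1 0 * p.2))

-- ===== PRECONDITION & SPEC =====
def Spec_count_lines_per_operation (content : String) (operation_counts : List (String × Int)) (out : List (String × Int)) : Prop := out = count_lines_per_operation_alt content operation_counts
instance (content : String) (operation_counts : List (String × Int)) (out : List (String × Int)) : Decidable (Spec_count_lines_per_operation content operation_counts out) := by unfold Spec_count_lines_per_operation; infer_instance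

-- ===== CLAIM (what is proved, stated in full; the proofs are below) =====
def Claim_equal_count_lines_per_operation : Prop := ∀ (content : String) (operation_counts : List (String × Int)), Dom_count_lines_per_operation content operation_counts → Spec_count_lines_per_operation content operation_counts (count_lines_per_operation content operation_counts)

-- ===== LEMMAS AND PROOFS =====

-- keys are unchanged through A's line-counting inner loop (keys iterated lie in the dict)
theorem pv_inner_keys (p : String → Bool) (ks : List String) (d : PySem.Dict String Int)
    (hsub : ∀ k ∈ ks, k ∈ d.keys) :
    (ks.foldl (fun d op => if p op then d.modify op 0 (· + 1) else d) d).keys = d.keys := by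
  induction ks generalizing d with
  | nil => rfl
  | cons k ks ih =>
      have hkd : (if p k then d.modify k 0 (· + 1) else d).keys = d.keys := by
        split
        · rw [PySem.Dict.keys_modify]
          exact PySem.Dict.keys_insert_of_contains d _
            (by simpa [PySem.Dict.contains_iff_mem_keys] using hsub k (List.mem_cons_self))
        · rfl
      simp only [List.foldl_cons]
      rw [ih _ (fun x hx => by rw [hkd]; exact hsub x (List.mem_cons_of_mem _ hx)), hkd]

-- effect of one line's inner loop (A) on a single entry (ks nodup, ks within the dict's keys)
theorem pv_inner_getD (p : String → Bool) (ks : List String) (hks : ks.Nodup)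
    (d : PySem.Dict String Int) (op : String) :
    (ks.foldl (fun d op => if p op then d.modify op 0 (· + 1) else d) d).getD op 0
      = d.getD op 0 + (if op ∈ ks ∧ p op then (1 : Int) else 0) := by
  induction ks generalizing d with
  | nil => simp
  | cons k ks ih =>
      obtain ⟨hk, hnd⟩ := List.nodup_cons.mp hks
      simp only [List.foldl_cons]
      rw [ih hnd]
      by_cases hin : p k
      · rw [if_pos hin, PySem.Dict.getD_modify]
        by_cases hop : op = k
        · subst hop
          rw [if_pos rfl, if_neg (fun h => hk h.1), if_pos ⟨List.mem_cons_self, hin⟩]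
          ring
        · rw [if_neg hop]
          by_cases hmem : op ∈ ks
          · simp [hmem, hop]
          · simp [hmem, hop]
      · rw [if_neg hin]
        by_cases hop : op = k
        · subst hop
          have h1 : ¬ (op ∈ ks ∧ p op = true) := fun h => hk h.1
          have h2 : ¬ (op ∈ op :: ks ∧ p op = true) := fun h => hin h.2
          rw [if_neg h1, if_neg h2]
        · simp [hop]

-- keys are unchanged through A's whole line loop
theorem pv_lines_keys (q : String → String → Bool) (lines : List String)
    (d : PySem.Dict String Int) :
    (lines.foldl
      (fun d line => d.keys.foldl (fun d op => if q op line then d.modify op 0 (· + 1) else d) d)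
      d).keys = d.keys := by
  induction lines generalizing d with
  | nil => rfl
  | cons l ls ih =>
      simp only [List.foldl_cons]
      rw [ih, pv_inner_keys _ _ _ (fun _ h => h)]

-- A's line loop counts, per key, the lines satisfying the match predicate
theorem pv_lines_getD (q : String → String → Bool) (lines : List String)
    (d : PySem.Dict String Int) (hnd : d.keys.Nodup) (op : String) (hop : op ∈ d.keys) :
    (lines.foldl
      (fun d line => d.keys.foldl (fun d op => if q op line then d.modify op 0 (· + 1) else d) d)
      d).getD op 0
      = d.getD op 0 + ((lines.countP (fun line => q op line) : Nat) : Int) := by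
  induction lines generalizing d with
  | nil => simp
  | cons l ls ih =>
      have hkeys := pv_inner_keys (fun op => q op l) d.keys d (fun _ h => h)
      simp only [List.foldl_cons]
      rw [ih _ (by rw [hkeys]; exact hnd) (by rw [hkeys]; exact hop),
        pv_inner_getD (fun op => q op l) d.keys hnd d op, List.countP_cons]
      by_cases h : q op l
      · rw [if_pos ⟨hop, h⟩, if_pos h]; push_cast; ring
      · rw [if_neg (fun hc => h hc.2), if_neg h]; push_cast; ring

-- keys are unchanged through the multiply loop (keys iterated lie in the dict)
theorem pv_mul_keys (g : String → Int) (ks : List String) (d : PySem.Dict String Int)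
    (hsub : ∀ k ∈ ks, k ∈ d.keys) :
    (ks.foldl (fun d op => d.modify op 0 (fun v => v * g op)) d).keys = d.keys := by
  induction ks generalizing d with
  | nil => rfl
  | cons k ks ih =>
      have hkd : (d.modify k 0 (fun v => v * g k)).keys = d.keys := by
        rw [PySem.Dict.keys_modify]
        exact PySem.Dict.keys_insert_of_contains d _
          (by simpa [PySem.Dict.contains_iff_mem_keys] using hsub k (List.mem_cons_self))
      simp only [List.foldl_cons]
      rw [ih _ (fun x hx => by rw [hkd]; exact hsub x (List.mem_cons_of_mem _ hx)), hkd]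

-- effect of the multiply loop on a single entry (ks nodup)
theorem pv_mul_getD (g : String → Int) (ks : List String) (hks : ks.Nodup)
    (d : PySem.Dict String Int) (op : String) :
    (ks.foldl (fun d op => d.modify op 0 (fun v => v * g op)) d).getD op 0
      = if op ∈ ks then d.getD op 0 * g op else d.getD op 0 := by
  induction ks generalizing d with
  | nil => simp
  | cons k ks ih =>
      obtain ⟨hk, hnd⟩ := List.nodup_cons.mp hks
      simp only [List.foldl_cons]
      rw [ih hnd, PySem.Dict.getD_modify]
      by_cases hop : op = k
      · subst hop; simp [hk]
      · by_cases hmem : op ∈ ks <;> simp [hmem, hop]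

-- the zero-initialisation loop: items are (k, 0) in key order
theorem pv_init_items (ks : List String) (hks : ks.Nodup) :
    (ks.foldl (fun d op => d.insert op (0 : Int)) PySem.Dict.empty).items
      = ks.map (fun k => (k, (0 : Int))) := by
  have := PySem.Dict.items_foldl_insert_fresh (l := ks) (k := id) (v := fun _ => (0 : Int))
    (d := (PySem.Dict.empty : PySem.Dict String Int))
    (by intro a _; simp [PySem.Dict.contains_empty]) (by simpa using hks)
  simpa using this

-- ===== B-side lemmas: the position scan =====

-- membership in B's inner pattern-length loop at one position
theorem pv_mem_lenloop (h : PySem.Dict String Int) (line : String) (n : Int) (Ls : List Int)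
    (i : Int) (m : PySem.Set String) (op : String) :
    op ∈ Ls.foldl
      (fun m L =>
        if i + L ≤ n then
          if h.contains (PySem.Str.slice line (some i) (some (i + L))) then
            PySem.Set.add m (PySem.Str.slice line (some i) (some (i + L)))
          else m
        else m) m
    ↔ op ∈ m ∨ ∃ L ∈ Ls, i + L ≤ n ∧ PySem.Str.slice line (some i) (some (i + L)) = op
        ∧ h.contains op = true := by
  induction Ls generalizing m with
  | nil => simp
  | cons L Ls ih =>
      simp only [List.foldl_cons]
      rw [ih]
      have h1 : op ∈ (if i + L ≤ n then
            if h.contains (PySem.Str.slice line (some i) (some (i + L))) then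
              PySem.Set.add m (PySem.Str.slice line (some i) (some (i + L)))
            else m
          else m)
          ↔ op ∈ m ∨ (i + L ≤ n ∧ PySem.Str.slice line (some i) (some (i + L)) = op
              ∧ h.contains op = true) := by
        split_ifs with hle hct
        · rw [PySem.Set.mem_add]
          constructor
          · rintro (hm | rfl)
            · exact Or.inl hm
            · exact Or.inr ⟨hle, rfl, hct⟩
          · rintro (hm | ⟨-, hs, -⟩)
            · exact Or.inl hm
            · exact Or.inr hs.symm
        · constructor
          · exact Or.inl
          · rintro (hm | ⟨-, hs, hc⟩)
            · exact hm
            · rw [← hs] at hc; exact absurd hc hct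
        · simp [hle]
      rw [h1]
      simp only [List.exists_mem_cons_iff]
      tauto

-- membership in B's whole position scan
theorem pv_mem_scan (h : PySem.Dict String Int) (line : String) (n : Int) (Ls : List Int)
    (is : List Int) (m : PySem.Set String) (op : String) :
    op ∈ is.foldl
      (fun m i => Ls.foldl
        (fun m L =>
          if i + L ≤ n then
            if h.contains (PySem.Str.slice line (some i) (some (i + L))) then
              PySem.Set.add m (PySem.Str.slice line (some i) (some (i + L)))
            else m
          else m) m) m
    ↔ op ∈ m ∨ ∃ i ∈ is, ∃ L ∈ Ls, i + L ≤ n ∧ PySem.Str.slice line (some i) (some (i + L)) = op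
        ∧ h.contains op = true := by
  induction is generalizing m with
  | nil => simp
  | cons i is ih =>
      simp only [List.foldl_cons]
      rw [ih, pv_mem_lenloop]
      simp only [List.exists_mem_cons_iff]
      rw [or_assoc]

-- the scan result has no duplicates
theorem pv_nodup_lenloop (h : PySem.Dict String Int) (line : String) (n : Int) (Ls : List Int)
    (i : Int) (m : PySem.Set String) (hm : m.Nodup) :
    (Ls.foldl
      (fun m L =>
        if i + L ≤ n then
          if h.contains (PySem.Str.slice line (some i) (some (i + L))) then
            PySem.Set.add m (PySem.Str.slice line (some i) (some (i + L)))
          else m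
        else m) m).Nodup := by
  induction Ls generalizing m with
  | nil => exact hm
  | cons L Ls ih =>
      simp only [List.foldl_cons]
      apply ih
      split_ifs <;> first | exact PySem.Set.nodup_add _ _ hm | exact hm

theorem pv_nodup_scan (h : PySem.Dict String Int) (line : String) (n : Int) (Ls : List Int)
    (is : List Int) (m : PySem.Set String) (hm : m.Nodup) :
    (is.foldl
      (fun m i => Ls.foldl
        (fun m L =>
          if i + L ≤ n then
            if h.contains (PySem.Str.slice line (some i) (some (i + L))) then
              PySem.Set.add m (PySem.Str.slice line (some i) (some (i + L)))
            else m
          else m) m) m).Nodup := by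
  induction is generalizing m with
  | nil => exact hm
  | cons i is ih =>
      simp only [List.foldl_cons]
      exact ih _ (pv_nodup_lenloop h line n Ls i m hm)

-- an operation of a scanned length is found by the scan exactly when it occurs in the line
theorem pv_matched_iff (h : PySem.Dict String Int) (line op : String) (Ls : List Int)
    (hcon : h.contains op = true) (hL : PySem.Str.len op ∈ Ls) (hLs : ∀ L ∈ Ls, 0 ≤ L) :
    (op ∈ (PySem.List.pyRange 0 (PySem.Str.len line + 1) 1).foldl
      (fun m i => Ls.foldl
        (fun m L =>
          if i + L ≤ PySem.Str.len line then
            if h.contains (PySem.Str.slice line (some i) (some (i + L))) then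
              PySem.Set.add m (PySem.Str.slice line (some i) (some (i + L)))
            else m
          else m) m) PySem.Set.empty)
    ↔ PySem.Str.isIn op line = true := by
  rw [pv_mem_scan]
  simp only [PySem.Set.empty, List.not_mem_nil, false_or]
  rw [PySem.Str.isIn_eq, ← PySem.Chars.exists_prefix_drop_iff_isIn]
  constructor
  · rintro ⟨i, hi, L, hLmem, hle, hslice, -⟩
    have h0i : 0 ≤ i := (PySem.List.mem_pyRange_one.mp hi).1
    have h0L : 0 ≤ L := hLs L hLmem
    have ht := congrArg String.toList hslice
    rw [PySem.Str.toList_slice, PySem.Chars.slice_eq_listSlice,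
      PySem.List.slice_toNat _ h0i (by omega)] at ht
    exact ⟨i.toNat, ht ▸ List.take_prefix _ _⟩
  · rintro ⟨j, hpre⟩
    have hj' : op.toList <+: line.toList.drop (min j line.toList.length) := by
      by_cases hj : j ≤ line.toList.length
      · rw [min_eq_left hj]; exact hpre
      · have hd : line.toList.drop j = [] := List.drop_eq_nil_of_le (by omega)
        rw [hd, List.prefix_nil] at hpre
        simp [hpre]
    have hlen : op.toList.length ≤ line.toList.length - min j line.toList.length := by
      have := hj'.length_le
      rwa [List.length_drop] at this
    have hmin : min j line.toList.length ≤ line.toList.length := min_le_right _ _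
    refine ⟨(min j line.toList.length : Int), ?_, PySem.Str.len op, hL, ?_, ?_, hcon⟩
    · rw [PySem.List.mem_pyRange_one, PySem.Str.len_eq]
      omega
    · rw [PySem.Str.len_eq, PySem.Str.len_eq]
      omega
    · apply String.toList_inj.mp
      rw [PySem.Str.toList_slice, PySem.Chars.slice_eq_listSlice,
        PySem.List.slice_toNat _ (by omega) (by rw [PySem.Str.len_eq]; omega)]
      have : ((min j line.toList.length : Int) + PySem.Str.len op).toNat
          - ((min j line.toList.length : Int)).toNat = op.toList.length := by
        rw [PySem.Str.len_eq]; omega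
      rw [this]
      have := List.prefix_iff_eq_take.mp hj'
      have hc : (min (j : Int) (line.toList.length : Int)).toNat = min j line.toList.length := by
        omega
      rw [hc]
      exact this.symm

-- keys are unchanged through B's per-line increment loop (keys iterated lie in the dict)
theorem pv_incr_keys (ks : List String) (d : PySem.Dict String Int)
    (hsub : ∀ k ∈ ks, k ∈ d.keys) :
    (ks.foldl (fun d op => d.modify op 0 (· + 1)) d).keys = d.keys := by
  induction ks generalizing d with
  | nil => rfl
  | cons k ks ih =>
      have hkd : (d.modify k 0 (· + 1)).keys = d.keys := by
        rw [PySem.Dict.keys_modify]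
        exact PySem.Dict.keys_insert_of_contains d _
          (by simpa [PySem.Dict.contains_iff_mem_keys] using hsub k (List.mem_cons_self))
      simp only [List.foldl_cons]
      rw [ih _ (fun x hx => by rw [hkd]; exact hsub x (List.mem_cons_of_mem _ hx)), hkd]

-- effect of B's per-line increment loop on a single entry (ks nodup)
theorem pv_incr_getD (ks : List String) (hks : ks.Nodup)
    (d : PySem.Dict String Int) (op : String) :
    (ks.foldl (fun d op => d.modify op 0 (· + 1)) d).getD op 0
      = d.getD op 0 + (if op ∈ ks then (1 : Int) else 0) := by
  induction ks generalizing d with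
  | nil => simp
  | cons k ks ih =>
      obtain ⟨hk, hnd⟩ := List.nodup_cons.mp hks
      simp only [List.foldl_cons]
      rw [ih hnd, PySem.Dict.getD_modify]
      by_cases hop : op = k
      · subst hop
        rw [if_pos rfl, if_neg hk, if_pos List.mem_cons_self]
        ring
      · rw [if_neg hop]
        by_cases hmem : op ∈ ks <;> simp [hmem, hop]

-- ===== VERDICT (by name: the statement is the Claim_ definition above) =====
theorem count_lines_per_operation_spec : Claim_equal_count_lines_per_operation := by
  intro content operation_counts _
  unfold Spec_count_lines_per_operation
  simp only [count_lines_per_operation, count_lines_per_operation_alt]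
  set oc := PySem.Dict.ofList operation_counts with hoc
  set Ls : PySem.Set Int := PySem.Set.ofList (oc.keys.map (fun op => PySem.Str.len op)) with hLsdef
  set lines := (PySem.Str.split? content "\n").getD [] with hlines
  have hnd : oc.keys.Nodup := PySem.Dict.nodup_keys_ofList operation_counts
  have hinit := pv_init_items oc.keys hnd
  set lpo0 := oc.keys.foldl (fun d op => d.insert op (0 : Int)) PySem.Dict.empty with hlpo0
  have hk0 : lpo0.keys = oc.keys := by
    show lpo0.items.map (·.1) = oc.keys
    rw [hinit, List.map_map]
    simp [Function.comp_def]
  have hg0 : ∀ op, lpo0.getD op 0 = 0 := by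
    intro op
    by_cases h : op ∈ lpo0.keys
    · rw [hk0] at h
      exact PySem.Dict.getD_of_mem_items (d := lpo0) (k := op) (v := 0)
        (by rw [hinit]; exact List.mem_map.mpr ⟨op, h, rfl⟩) (by rw [hk0]; exact hnd) 0
    · exact PySem.Dict.getD_of_not_contains lpo0 0
        (Bool.eq_false_iff.mpr (mt (PySem.Dict.contains_iff_mem_keys lpo0 op).mp h))
  -- facts about the scanned pattern lengths
  have hLs : ∀ L ∈ Ls, 0 ≤ L := by
    intro L hL
    obtain ⟨k, -, rfl⟩ := List.mem_map.mp ((PySem.Set.mem_ofList _ _).mp hL)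
    rw [PySem.Str.len_eq]
    exact Int.natCast_nonneg _
  have hLmem : ∀ op ∈ oc.keys, PySem.Str.len op ∈ Ls := by
    intro op hop
    exact (PySem.Set.mem_ofList _ _).mpr (List.mem_map.mpr ⟨op, hop, rfl⟩)
  -- ===== A's line loop =====
  set lpo1 := lines.foldl
    (fun d line =>
      d.keys.foldl (fun d op => if PySem.Str.isIn op line then d.modify op 0 (· + 1) else d) d)
    lpo0 with hlpo1
  have hk1 : lpo1.keys = oc.keys := by
    rw [hlpo1, pv_lines_keys (fun op line => PySem.Str.isIn op line), hk0]
  have hnd1 : lpo1.keys.Nodup := by rw [hk1]; exact hnd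
  have hg1 : ∀ op ∈ oc.keys, lpo1.getD op 0
      = ((lines.countP (fun line => PySem.Str.isIn op line) : Nat) : Int) := by
    intro op hop
    rw [hlpo1, pv_lines_getD (fun op line => PySem.Str.isIn op line) lines lpo0
      (by rw [hk0]; exact hnd) op (by rw [hk0]; exact hop), hg0, zero_add]
  set lpo2 := lpo1.keys.foldl (fun d op => d.modify op 0 (fun v => v * oc.getD op 0)) lpo1 with hlpo2
  have hk2 : lpo2.keys = oc.keys := by
    rw [hlpo2, pv_mul_keys _ _ _ (fun _ h => h), hk1]
  have hg2 : ∀ op ∈ oc.keys, lpo2.getD op 0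
      = ((lines.countP (fun line => PySem.Str.isIn op line) : Nat) : Int) * oc.getD op 0 := by
    intro op hop
    rw [hlpo2, pv_mul_getD _ _ hnd1, if_pos (by rw [hk1]; exact hop), hg1 op hop]
  -- ===== B's scanning line loop =====
  have hB : ∀ (ls : List String) (d : PySem.Dict String Int), d.keys = oc.keys →
      (ls.foldl
        (fun h line =>
          ((PySem.List.pyRange 0 (PySem.Str.len line + 1) 1).foldl
            (fun m i => Ls.foldl
              (fun m L =>
                if i + L ≤ PySem.Str.len line then
                  if h.contains (PySem.Str.slice line (some i) (some (i + L))) then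
                    PySem.Set.add m (PySem.Str.slice line (some i) (some (i + L)))
                  else m
                else m) m)
            PySem.Set.empty).foldl (fun h op => h.modify op 0 (· + 1)) h)
        d).keys = oc.keys
      ∧ ∀ op ∈ oc.keys,
        (ls.foldl
          (fun h line =>
            ((PySem.List.pyRange 0 (PySem.Str.len line + 1) 1).foldl
              (fun m i => Ls.foldl
                (fun m L =>
                  if i + L ≤ PySem.Str.len line then
                    if h.contains (PySem.Str.slice line (some i) (some (i + L))) then
                      PySem.Set.add m (PySem.Str.slice line (some i) (some (i + L)))
                    else m
                  else m) m)
              PySem.Set.empty).foldl (fun h op => h.modify op 0 (· + 1)) h)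
          d).getD op 0
        = d.getD op 0 + ((ls.countP (fun line => PySem.Str.isIn op line) : Nat) : Int) := by
    intro ls
    induction ls with
    | nil => intro d hd; exact ⟨hd, by simp⟩
    | cons l ls ih =>
        intro d hd
        set M := (PySem.List.pyRange 0 (PySem.Str.len l + 1) 1).foldl
          (fun m i => Ls.foldl
            (fun m L =>
              if i + L ≤ PySem.Str.len l then
                if d.contains (PySem.Str.slice l (some i) (some (i + L))) then
                  PySem.Set.add m (PySem.Str.slice l (some i) (some (i + L)))
                else m
              else m) m)
          PySem.Set.empty with hM
        have hMsub : ∀ k ∈ M, k ∈ d.keys := by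
          intro k hk
          rcases (pv_mem_scan d l (PySem.Str.len l) Ls _ PySem.Set.empty k).mp hk with hk' | ⟨-, -, -, -, -, -, hc⟩
          · cases hk'
          · exact (PySem.Dict.contains_iff_mem_keys d k).mp hc
        have hMnd : M.Nodup := pv_nodup_scan d l (PySem.Str.len l) Ls _ PySem.Set.empty List.nodup_nil
        have hkeys : (M.foldl (fun h op => h.modify op 0 (· + 1)) d).keys = d.keys :=
          pv_incr_keys M d hMsub
        obtain ⟨ihk, ihg⟩ := ih (M.foldl (fun h op => h.modify op 0 (· + 1)) d) (hkeys.trans hd)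
        refine ⟨ihk, fun op hop => ?_⟩
        rw [List.foldl_cons]
        rw [ihg op hop, pv_incr_getD M hMnd d op, List.countP_cons]
        have hiff : op ∈ M ↔ PySem.Str.isIn op l = true := by
          rw [hM]
          exact pv_matched_iff d l op Ls
            ((PySem.Dict.contains_iff_mem_keys d op).mpr (by rw [hd]; exact hop))
            (hLmem op hop) hLs
        by_cases hIn : PySem.Str.isIn op l
        · rw [if_pos (hiff.mpr hIn), if_pos hIn]
          push_cast; ring
        · rw [if_neg (fun hc => hIn (hiff.mp hc)), if_neg hIn]
          push_cast; ring
  obtain ⟨hBk, hBg⟩ := hB lines lpo0 hk0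
  -- ===== both sides are the same map over the keys =====
  rw [PySem.Dict.items_eq_map_keys lpo2 (by rw [hk2]; exact hnd) 0,
    PySem.Dict.items_eq_map_keys oc hnd 0, List.map_map, hk2]
  apply List.map_congr_left
  intro op hop
  simp only [Function.comp]
  rw [hg2 op hop, hBg op hop, hg0, zero_add]
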